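-- pv_equiv track=rewrite | github.com/PierreVieira/TP1_CG | src/gerador_de_coordenadas2.py | coord_pts
-- ===== SOURCE A (Python) =====
-- def coord_pts(lista_pts):
--     for c in lista_pts:
--         s = -100
--         for d in range(len(c)):
--             s += 6
--             c[d]['x'] = s
--             c[d]['y'] = 95
--     return c
-- ===== SOURCE B (Python) =====
-- def coord_pts(lista_pts):
--     c = lista_pts[-1]
--     return [{**pt, 'x': -94 + 6 * i, 'y': 95} for i, pt in enumerate(c)]
-- ===== Notes on version B (the rewrite author's own statement) =====
-- stated objective: alternative
-- what changed: B exploits that A's return value is just its LAST sublist after the update, so it skips the pass over all earlier sublists and builds the transformed last sublist directly as fresh dicts with closed-form x = -94 + 6*i; return-value equivalence only, B does not mutate the input.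
import Mathlib
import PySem

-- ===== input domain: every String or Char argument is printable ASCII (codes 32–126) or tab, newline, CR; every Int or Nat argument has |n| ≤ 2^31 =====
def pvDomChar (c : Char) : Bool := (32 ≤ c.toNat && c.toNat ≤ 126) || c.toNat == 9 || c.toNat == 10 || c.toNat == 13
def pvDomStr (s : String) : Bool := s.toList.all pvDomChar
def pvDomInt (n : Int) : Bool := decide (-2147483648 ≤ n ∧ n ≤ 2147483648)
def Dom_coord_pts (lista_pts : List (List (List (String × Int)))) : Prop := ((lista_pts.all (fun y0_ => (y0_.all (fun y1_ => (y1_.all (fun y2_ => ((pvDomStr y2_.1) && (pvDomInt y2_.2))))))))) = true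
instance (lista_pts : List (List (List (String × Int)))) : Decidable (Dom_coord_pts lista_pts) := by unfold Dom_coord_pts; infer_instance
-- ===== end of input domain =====

-- B observes that A's RETURN VALUE is just the last sublist after the update, so it transforms only
-- lista_pts[-1] with closed-form x = -94 + 6*i, skipping every earlier sublist (alternative algorithm).
-- A mutates the inner dicts of EVERY sublist in place; B does not mutate its argument: the
-- equivalence proved here is about the return value only.


-- dict assignment d[k] = v on an association list: overwrite the first matching key in place,
-- append a new key at the end (exact for Python dicts, whose keys are unique).
def dset (d : List (String × Int)) (k : String) (v : Int) : List (String × Int) :=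
  match d with
  | [] => [(k, v)]
  | (k', v') :: rest => if k' = k then (k, v) :: rest else (k', v') :: dset rest k v

-- ===== PORT A =====
-- inner body of A's 'for d in range(len(c))' loop over state (s, c):
-- s += 6; c[d]['x'] = s (get, mutate, set back); c[d]['y'] = 95 (get, mutate, set back).
def coordStepA (st : Int × List (List (String × Int))) (d : Int) :
    Int × List (List (String × Int)) :=
  let s := st.1 + 6
  let c1 := PySem.List.pySetD st.2 d (dset (PySem.List.pyGetD st.2 d []) "x" s)
  let c2 := PySem.List.pySetD c1 d (dset (PySem.List.pyGetD c1 d []) "y" 95)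
  (s, c2)

def coord_pts (lista_pts : List (List (List (String × Int)))) : List (List (String × Int)) :=
  (lista_pts.foldl
    (fun (_last : Option (List (List (String × Int)))) c =>
      some ((PySem.List.pyRange 0 c.length 1).foldl coordStepA (-100, c)).2)
    none).getD []   -- none = the NameError 'c' on empty lista_pts; excluded by Pre_

-- ===== PORT B =====
-- lista_pts[-1]; then one comprehension building fresh dicts; {**pt, 'x': …, 'y': …} = dset ∘ dset
def coord_pts_alt (lista_pts : List (List (List (String × Int)))) : List (List (String × Int)) :=
  match PySem.List.pyGet? lista_pts (-1) with
  | none => []   -- IndexError on empty lista_pts; excluded by Pre_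
  | some c =>
      (PySem.List.enumerate c).map
        (fun ip => dset (dset ip.2 "x" (-94 + 6 * ip.1)) "y" 95)

-- ===== PRECONDITION & SPEC =====
-- Pre_ excludes only the empty outer list, on which A raises NameError ('c' is unbound).
def Pre_coord_pts (lista_pts : List (List (List (String × Int)))) : Prop := lista_pts ≠ []
instance (lista_pts : List (List (List (String × Int)))) : Decidable (Pre_coord_pts lista_pts) := by unfold Pre_coord_pts; infer_instance
def pvWitness_coord_pts : (List (List (List (String × Int)))) := [[[("a", 1)], []]]
def Spec_coord_pts (lista_pts : List (List (List (String × Int)))) (out : List (List (String × Int))) : Prop := out = coord_pts_alt lista_pts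
instance (lista_pts : List (List (List (String × Int)))) (out : List (List (String × Int))) : Decidable (Spec_coord_pts lista_pts out) := by unfold Spec_coord_pts; infer_instance

-- ===== CLAIM (what is proved, stated in full; the proofs are below) =====
def Claim_equal_coord_pts : Prop := ∀ (lista_pts : List (List (List (String × Int)))), Dom_coord_pts lista_pts → Pre_coord_pts lista_pts → Spec_coord_pts lista_pts (coord_pts lista_pts)

-- ===== LEMMAS AND PROOFS =====

-- the loop body applied at index pre.length of pre ++ r :: rs rewrites element r in place
theorem coordStepA_at (pre rs : List (List (String × Int))) (r : List (String × Int)) (s : Int) :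
    coordStepA (s, pre ++ r :: rs) (pre.length : Int) =
      (s + 6, pre ++ (dset (dset r "x" (s + 6)) "y" 95) :: rs) := by
  simp [coordStepA, PySem.List.pyGetD_natCast, PySem.List.pySetD_natCast,
    List.getD_eq_getElem?_getD, List.set_append_right]

-- A's inner fold over pyRange pre.length (pre.length + rest.length) acting on pre ++ rest
-- equals the enumerate-map of rest (offset pre.length), leaving pre unchanged.
theorem loop_eq (rest pre : List (List (String × Int))) :
    (PySem.List.pyRange (pre.length : Int) ((pre.length : Int) + rest.length) 1).foldl
        coordStepA (-100 + 6 * pre.length, pre ++ rest) =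
      (-100 + 6 * ((pre.length : Int) + rest.length),
        pre ++ (PySem.List.enumerate rest (pre.length : Int)).map
          (fun ip => dset (dset ip.2 "x" (-94 + 6 * ip.1)) "y" 95)) := by
  induction rest generalizing pre with
  | nil =>
      simp [PySem.List.pyRange_one_eq_nil, PySem.List.enumerate]
  | cons r rs ih =>
      have hlt : (pre.length : Int) < (pre.length : Int) + ((r :: rs).length : Int) := by
        simp
      rw [PySem.List.pyRange_one_cons hlt]
      rw [List.foldl_cons, coordStepA_at]
      have key := ih (pre ++ [dset (dset r "x" (-100 + 6 * (pre.length : Int) + 6)) "y" 95])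
      simp only [List.length_append, List.length_cons, List.length_nil,
        List.append_assoc, List.singleton_append, Nat.cast_add, Nat.cast_one,
       zero_add] at key ⊢
      rw [show ((pre.length : Int) + 1 + (rs.length : Int)) = (pre.length : Int) + ((rs.length : Int) + 1) by ring] at key
      rw [show (-100 + 6 * ((pre.length : Int) + 1)) = -100 + 6 * (pre.length : Int) + 6 by ring] at key
      rw [key]
      rw [PySem.List.enumerate_cons]
      simp only [List.map_cons]
      norm_num
      congr 2
      ring

-- per-sublist: A's inner loop on c produces exactly B's enumerate-map of c
theorem proc_eq (c : List (List (String × Int))) :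
    ((PySem.List.pyRange 0 c.length 1).foldl coordStepA (-100, c)).2 =
      (PySem.List.enumerate c).map
        (fun ip => dset (dset ip.2 "x" (-94 + 6 * ip.1)) "y" 95) := by
  have h := loop_eq c []
  simp only [List.length_nil, Nat.cast_zero, List.nil_append, zero_add, mul_zero, add_zero] at h
  rw [h]

-- A's outer fold keeps only the last sublist's result
theorem foldl_last {α β : Type} (F : α → β) (l : List α) (o : Option β) :
    l.foldl (fun (_last : Option β) c => some (F c)) o =
      match l.getLast? with
      | none => o
      | some c => some (F c) := by
  induction l generalizing o with
  | nil => rfl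
  | cons c l ih =>
      rw [List.foldl_cons, ih]
      cases hl : l.getLast? with
      | none =>
          have : l = [] := List.getLast?_eq_none_iff.mp hl
          subst this; rfl
      | some d =>
          have : (c :: l).getLast? = some d := by
            rw [List.getLast?_cons]
            simp [hl]
          simp [this]

-- ===== VERDICT (by name: the statement is the Claim_ definition above) =====
theorem coord_pts_spec : Claim_equal_coord_pts := by
  intro lista_pts _ hpre
  unfold Spec_coord_pts coord_pts coord_pts_alt
  rw [foldl_last]
  rw [PySem.List.pyGet?_neg_one]
  cases hl : lista_pts.getLast? with
  | none => exact absurd (List.getLast?_eq_none_iff.mp hl) hpre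
  | some c => simp [proc_eq]
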